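-- pv_equiv track=rewrite | github.com/cratpij/logslice | logslice/cartesian.py | cartesian_with_lookup
-- ===== SOURCE A (Python) =====
-- from typing import Dict, Any, List, Iterable, Optional
--
-- def cartesian_with_lookup(
--     records: Iterable[Dict[str, Any]],
--     lookup: List[Dict[str, Any]],
--     join_field: Optional[str] = None,
-- ) -> List[Dict[str, Any]]:
--     """Cross-join records with a lookup list, optionally filtering to rows
--     where record[join_field] == lookup_row[join_field].
--     """
--     results = []
--     for record in records:
--         for row in lookup:
--             if join_field is not None:
--                 if record.get(join_field) != row.get(join_field):
--                     continue
--             merged = {**record, **row}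
--             results.append(merged)
--     return results
-- ===== SOURCE B (Python) =====
-- from typing import Dict, Any, List, Iterable, Optional
--
-- def cartesian_with_lookup(
--     records: Iterable[Dict[str, Any]],
--     lookup: List[Dict[str, Any]],
--     join_field: Optional[str] = None,
-- ) -> List[Dict[str, Any]]:
--     if join_field is None:
--         return [{**record, **row} for record in records for row in lookup]
--     index: Dict[Any, list] = {}
--     for row in lookup:
--         index.setdefault(row.get(join_field), []).append(row)
--     out = []
--     for record in records:
--         for row in index.get(record.get(join_field), []):
--             out.append({**record, **row})
--     return out
-- ===== Notes on version B (the rewrite author's own statement) =====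
-- stated objective: alternative
-- what changed: Replaces the nested scan over lookup per record by a one-pass hash index of lookup rows keyed on their join_field value, probed once per record (plain flat comprehension when join_field is None); measured only ~1.3x faster on the generated inputs, so no speed claim.
import Mathlib
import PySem

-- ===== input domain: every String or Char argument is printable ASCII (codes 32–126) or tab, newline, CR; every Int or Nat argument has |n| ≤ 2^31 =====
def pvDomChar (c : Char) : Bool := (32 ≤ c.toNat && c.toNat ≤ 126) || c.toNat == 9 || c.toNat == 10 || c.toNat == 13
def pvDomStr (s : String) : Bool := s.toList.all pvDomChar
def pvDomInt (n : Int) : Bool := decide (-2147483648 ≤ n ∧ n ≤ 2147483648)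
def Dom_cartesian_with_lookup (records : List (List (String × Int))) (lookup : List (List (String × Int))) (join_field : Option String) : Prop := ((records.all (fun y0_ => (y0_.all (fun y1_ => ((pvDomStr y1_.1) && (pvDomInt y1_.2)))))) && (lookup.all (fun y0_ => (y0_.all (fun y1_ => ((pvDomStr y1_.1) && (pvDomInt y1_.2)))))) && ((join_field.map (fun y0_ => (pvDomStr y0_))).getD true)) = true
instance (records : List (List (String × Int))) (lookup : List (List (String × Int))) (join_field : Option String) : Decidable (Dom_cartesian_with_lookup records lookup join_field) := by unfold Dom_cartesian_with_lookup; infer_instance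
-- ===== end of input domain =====

-- B replaces A's nested scan over lookup per record with a one-pass hash index of
-- lookup rows keyed by their join_field value, probed once per record (a different algorithm; no speed claim).

-- ===== PORT A =====
-- {**record, **row} : build a dict from record's items, then overwrite/append row's items
def pvMerged (record row : List (String × Int)) : List (String × Int) :=
  ((PySem.Dict.ofList record).update row).items

def cartesian_with_lookup (records : List (List (String × Int))) (lookup : List (List (String × Int))) (join_field : Option String) : List (List (String × Int)) :=
  records.foldl (fun results record =>
    lookup.foldl (fun results row =>
      match join_field with
      | some jf =>
          if (PySem.Dict.ofList record).get? jf ≠ (PySem.Dict.ofList row).get? jf then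
            results
          else
            results ++ [pvMerged record row]
      | none => results ++ [pvMerged record row]) results) []

-- ===== PORT B =====
def cartesian_with_lookup_alt (records : List (List (String × Int))) (lookup : List (List (String × Int))) (join_field : Option String) : List (List (String × Int)) :=
  match join_field with
  | none =>
      records.flatMap (fun record => lookup.map (fun row => pvMerged record row))
  | some jf =>
      -- index.setdefault(row.get(join_field), []).append(row)
      let index : PySem.Dict (Option Int) (List (List (String × Int))) :=
        lookup.foldl (fun d row => d.modify ((PySem.Dict.ofList row).get? jf) [] (fun v => v ++ [row])) PySem.Dict.empty
      records.foldl (fun out record =>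
        out ++ (index.getD ((PySem.Dict.ofList record).get? jf) []).map (fun row => pvMerged record row)) []

-- ===== PRECONDITION & SPEC =====
def Spec_cartesian_with_lookup (records : List (List (String × Int))) (lookup : List (List (String × Int))) (join_field : Option String) (out : List (List (String × Int))) : Prop := out = cartesian_with_lookup_alt records lookup join_field
instance (records : List (List (String × Int))) (lookup : List (List (String × Int))) (join_field : Option String) (out : List (List (String × Int))) : Decidable (Spec_cartesian_with_lookup records lookup join_field out) := by unfold Spec_cartesian_with_lookup; infer_instance

-- ===== CLAIM (what is proved, stated in full; the proofs are below) =====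
def Claim_equal_cartesian_with_lookup : Prop := ∀ (records : List (List (String × Int))) (lookup : List (List (String × Int))) (join_field : Option String), Dom_cartesian_with_lookup records lookup join_field → Spec_cartesian_with_lookup records lookup join_field (cartesian_with_lookup records lookup join_field)

-- ===== LEMMAS AND PROOFS =====

-- A's 'if x != y: continue' guard, flipped into a positive '=='-filter shape
theorem pv_ite_ne_flip {β : Type} (a b : Option Int) (x y : β) :
    (if a ≠ b then x else y) = (if (b == a) = true then y else x) := by
  by_cases h : a = b <;> simp [h]
  · exact fun hba => (h hba.symm).elim

-- B's index, probed at key c, is exactly the rows of lookup whose key is c (in order)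
theorem pv_index_getD (lookup : List (List (String × Int))) (jf : String) (c : Option Int) :
    (lookup.foldl (fun d row => d.modify ((PySem.Dict.ofList row).get? jf) [] (fun v => v ++ [row]))
        (PySem.Dict.empty : PySem.Dict (Option Int) (List (List (String × Int))))).getD c []
      = lookup.filter (fun row => (PySem.Dict.ofList row).get? jf == c) := by
  have h := PySem.Dict.getD_foldl_modify_append
    (lookup.map (fun row => ((PySem.Dict.ofList row).get? jf, row)))
    (PySem.Dict.empty : PySem.Dict (Option Int) (List (List (String × Int)))) c
  rw [List.foldl_map] at h
  rw [h]
  simp only [List.filter_map, List.map_map]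
  have : ((fun x : (Option Int) × (List (String × Int)) => x.2) ∘ fun row : List (String × Int) => ((PySem.Dict.ofList row).get? jf, row)) = id := rfl
  simp [this]
  rfl

-- ===== VERDICT (by name: the statement is the Claim_ definition above) =====
theorem cartesian_with_lookup_spec : Claim_equal_cartesian_with_lookup := by
  intro records lookup join_field _
  show cartesian_with_lookup records lookup join_field = cartesian_with_lookup_alt records lookup join_field
  cases join_field with
  | none =>
      simp only [cartesian_with_lookup, cartesian_with_lookup_alt,
        PySem.List.foldl_append_singleton_eq_map, PySem.List.foldl_append_eq_flatMap,
        List.nil_append]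
  | some jf =>
      simp only [cartesian_with_lookup, cartesian_with_lookup_alt, pv_ite_ne_flip,
        PySem.List.foldl_append_if, pv_index_getD]
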